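-- pv_equiv track=rewrite | github.com/elenakhas/methods-for-nlp-labs | Strings&Comprehensions.Python/Lab3_Python_Khasanova.py | is_cyclone_phrase
-- ===== SOURCE A (Python) =====
-- def is_cyclone_phrase(string):
--     list_words = string.split(" ")
--     for word in list_words:
--         for i in range ((len(word)-1)//2):
--             curr_letter = word[i]
--             next_letter = word[-i-1]
--             if curr_letter > next_letter:
--                 return False
--             curr_letter = word[-i-1]
--             next_letter = word[i+1]
--             if curr_letter > next_letter:
--                 return False
--         if(len(word))%2 == 0 and len(word)>0:
--             if word[len(word)//2 - 1] > word[len(word)//2]: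
--                 return False
--     return True
-- ===== SOURCE B (Python) =====
-- def is_cyclone_phrase(string):
--     return all(_word_ok(word) for word in string.split(" "))
--
-- def _word_ok(word):
--     # build the cyclone order [0, n-1, 1, n-2, ...] with two pointers and a toggle
--     seq = []
--     lo, hi = 0, len(word) - 1
--     take_lo = True
--     while lo <= hi:
--         if take_lo:
--             seq.append(word[lo])
--             lo += 1
--         else:
--             seq.append(word[hi])
--             hi -= 1
--         take_lo = not take_lo
--     # the word is cyclone-ordered iff that sequence is non-decreasing
--     return all(a <= b for a, b in zip(seq, seq[1:]))
-- ===== Notes on version B (the rewrite author's own statement) =====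
-- stated objective: simpler
-- what changed: B builds, per word, the explicit cyclone-order character sequence [0, n-1, 1, n-2, ...] with two pointers and a toggle and then just checks that sequence is non-decreasing, instead of A's interleaved inline index comparisons with negative indexing and a special even-length middle-pair case.
import Mathlib
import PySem

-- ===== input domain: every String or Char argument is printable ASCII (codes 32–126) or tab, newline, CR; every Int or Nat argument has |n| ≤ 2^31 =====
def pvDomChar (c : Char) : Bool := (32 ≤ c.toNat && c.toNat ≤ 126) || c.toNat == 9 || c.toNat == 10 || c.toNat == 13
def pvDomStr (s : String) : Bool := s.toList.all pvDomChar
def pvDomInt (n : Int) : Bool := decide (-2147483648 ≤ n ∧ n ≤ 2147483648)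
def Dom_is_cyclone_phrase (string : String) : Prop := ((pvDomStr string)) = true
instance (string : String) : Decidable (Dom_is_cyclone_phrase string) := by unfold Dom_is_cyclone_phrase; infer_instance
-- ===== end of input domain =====

-- B replaces A's interleaved inline index comparisons (with a special even-length middle case)
-- by building each word's explicit cyclone-order sequence with two pointers and checking it is
-- non-decreasing; same cost, plainer decomposition.

-- ===== PORT A =====
-- inner 'for i in range((len(word)-1)//2)' with its two early returns; on [] the loop fell
-- through, so the even-length middle check runs.  word indexing is always in range here, so
-- pyGetD with a dummy default is exact.
def pvA_inner (w : List Char) : List Int → Bool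
  | [] =>
      if (PySem.Chars.len w) % 2 == 0 && (PySem.Chars.len w) > 0 then
        if PySem.List.pyGetD w (PySem.Int.floordiv (PySem.Chars.len w) 2 - 1) ' ' >
           PySem.List.pyGetD w (PySem.Int.floordiv (PySem.Chars.len w) 2) ' ' then false else true
      else true
  | i :: rest =>
      let curr_letter := PySem.List.pyGetD w i ' '
      let next_letter := PySem.List.pyGetD w (-i - 1) ' '
      if curr_letter > next_letter then false
      else
        let curr_letter := PySem.List.pyGetD w (-i - 1) ' '
        let next_letter := PySem.List.pyGetD w (i + 1) ' '
        if curr_letter > next_letter then false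
        else pvA_inner w rest

-- outer 'for word in list_words' with its early returns
def pvA_words : List (List Char) → Bool
  | [] => true
  | w :: ws =>
      if pvA_inner w (PySem.List.pyRange 0 (PySem.Int.floordiv (PySem.Chars.len w - 1) 2) 1) then
        pvA_words ws
      else false

def is_cyclone_phrase (string : String) : Bool :=
  pvA_words (PySem.Chars.splitOn string.toList [' '])

-- ===== PORT B =====
-- the two-pointer toggle loop building the cyclone-order sequence (Source B's while loop);
-- indices are always in range while lo ≤ hi, so pyGetD with a dummy default is exact
def pvB_zig (w : List Char) (lo hi : Int) (takeLo : Bool) : List Char :=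
  if lo ≤ hi then
    (if takeLo then PySem.List.pyGetD w lo ' ' else PySem.List.pyGetD w hi ' ') ::
      pvB_zig w (if takeLo then lo + 1 else lo) (if takeLo then hi else hi - 1) (!takeLo)
  else []
termination_by (hi + 1 - lo).toNat
decreasing_by all_goals (split <;> omega)

-- 'all(a <= b for a, b in zip(seq, seq[1:]))'
def pvB_nondecr : List Char → Bool
  | [] => true
  | [_] => true
  | a :: b :: rest => decide (a ≤ b) && pvB_nondecr (b :: rest)

def pvB_word_ok (w : List Char) : Bool :=
  pvB_nondecr (pvB_zig w 0 (PySem.Chars.len w - 1) true)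

def is_cyclone_phrase_alt (string : String) : Bool :=
  (PySem.Chars.splitOn string.toList [' ']).all pvB_word_ok

-- ===== PRECONDITION & SPEC =====
def Spec_is_cyclone_phrase (string : String) (out : Bool) : Prop := out = is_cyclone_phrase_alt string
instance (string : String) (out : Bool) : Decidable (Spec_is_cyclone_phrase string out) := by unfold Spec_is_cyclone_phrase; infer_instance

-- ===== CLAIM (what is proved, stated in full; the proofs are below) =====
def Claim_equal_is_cyclone_phrase : Prop := ∀ (string : String), Dom_is_cyclone_phrase string → Spec_is_cyclone_phrase string (is_cyclone_phrase string)

-- ===== LEMMAS AND PROOFS =====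

-- common segment form: the conjunction of comparisons that both programs perform on the
-- index segment [lo, hi] of w
def pvZseg (w : List Char) (lo hi : Int) : Bool :=
  if hi ≤ lo then true
  else
    decide (PySem.List.pyGetD w lo ' ' ≤ PySem.List.pyGetD w hi ' ') &&
    decide (PySem.List.pyGetD w hi ' ' ≤ PySem.List.pyGetD w (lo + 1) ' ') &&
    pvZseg w (lo + 1) (hi - 1)
termination_by (hi - lo).toNat
decreasing_by omega

lemma pvB_seg (w : List Char) (lo hi : Int) :
    pvB_nondecr (pvB_zig w lo hi true) = pvZseg w lo hi := by
  rw [pvB_zig]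
  by_cases hll : lo ≤ hi
  · rw [if_pos hll]
    simp only [if_true, Bool.not_true]
    rw [pvB_zig]
    by_cases h2 : lo + 1 ≤ hi
    · rw [if_pos h2]
      simp only [Bool.false_eq_true, if_false, Bool.not_false]
      rw [pvZseg, if_neg (by omega : ¬ hi ≤ lo)]
      have IH := pvB_seg w (lo + 1) (hi - 1)
      by_cases h3 : lo + 1 ≤ hi - 1
      · -- at least one middle element: the middle zig starts with w[lo+1]
        have hmid : pvB_zig w (lo + 1) (hi - 1) true =
            PySem.List.pyGetD w (lo + 1) ' ' :: pvB_zig w (lo + 1 + 1) (hi - 1) false := by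
          rw [pvB_zig, if_pos h3]
          simp only [if_true, Bool.not_true]
        rw [hmid] at IH ⊢
        simp only [pvB_nondecr] at IH ⊢
        rw [← IH]
        simp [Bool.and_assoc]
      · -- hi = lo + 1 : empty middle, the extra comparison w[hi] ≤ w[lo+1] is reflexive
        have hz : pvB_zig w (lo + 1) (hi - 1) true = [] := by
          rw [pvB_zig, if_neg h3]
        have hz2 : pvZseg w (lo + 1) (hi - 1) = true := by
          rw [pvZseg, if_pos (by omega)]
        have he : hi = lo + 1 := by omega
        rw [hz, hz2, he]
        simp [pvB_nondecr]
    · -- lo = hi : singleton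
      rw [if_neg h2, pvZseg, if_pos (by omega : hi ≤ lo)]
      simp [pvB_nondecr]
  · rw [if_neg hll, pvZseg, if_pos (by omega : hi ≤ lo)]
    simp [pvB_nondecr]
termination_by (hi + 1 - lo).toNat
decreasing_by omega

-- negative index rewrite: w[-k-1] = w[n-1-k] for 0 ≤ k < n
lemma pvGetD_neg (w : List Char) (k : Int) (h0 : 0 ≤ k) (h1 : k < PySem.Chars.len w) :
    PySem.List.pyGetD w (-k - 1) ' ' = PySem.List.pyGetD w (PySem.Chars.len w - 1 - k) ' ' := by
  have hlen : PySem.Chars.len w = (w.length : Int) := by simp [PySem.Chars.len]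
  rw [hlen] at h1 ⊢
  have hk : -k - 1 = -(((k.toNat + 1 : Nat) : Int)) := by omega
  rw [hk, PySem.List.pyGetD_neg_natCast w (k.toNat + 1) ' ' (by omega) (by omega)]
  rw [PySem.List.pyGetD_eq_getElem w ' ' (by omega) (by omega)]
  congr 1
  omega

-- A's inner loop from k, followed by the middle check, equals the segment form
lemma pvA_seg (w : List Char) (k : Int)
    (h0 : 0 ≤ k) (h1 : k ≤ max (PySem.Int.floordiv (PySem.Chars.len w - 1) 2) 0) :
    pvA_inner w (PySem.List.pyRange k (PySem.Int.floordiv (PySem.Chars.len w - 1) 2) 1) =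
      pvZseg w k (PySem.Chars.len w - 1 - k) := by
  have hlen : PySem.Chars.len w = ((w.length : Int)) := by simp [PySem.Chars.len]
  have hE : PySem.Int.floordiv ((w.length : Int) - 1) 2 = ((w.length : Int) - 1) / 2 := by
    simp [PySem.Int.floordiv, Int.fdiv_eq_ediv]
  rw [hlen] at h1 ⊢
  by_cases hk : k < PySem.Int.floordiv ((w.length : Int) - 1) 2
  · -- loop step
    rw [PySem.List.pyRange_one_cons hk]
    rw [hE] at hk h1
    have hbound : k + 1 < (w.length : Int) - 1 - k := by omega
    simp only [pvA_inner]
    rw [pvGetD_neg w k h0 (by rw [hlen]; omega)]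
    rw [hlen]
    rw [pvZseg]
    rw [if_neg (by omega : ¬ (w.length : Int) - 1 - k ≤ k)]
    have IH := pvA_seg w (k + 1) (by omega) (by rw [hlen, hE]; omega)
    rw [hlen] at IH
    have harith : (w.length : Int) - 1 - k - 1 = (w.length : Int) - 1 - (k + 1) := by omega
    rw [harith, ← IH]
    by_cases c1 : PySem.List.pyGetD w k ' ' >
        PySem.List.pyGetD w ((w.length : Int) - 1 - k) ' '
    · rw [if_pos c1]
      simp [not_le.mpr c1]
    · rw [if_neg c1]
      by_cases c2 : PySem.List.pyGetD w ((w.length : Int) - 1 - k) ' ' >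
          PySem.List.pyGetD w (k + 1) ' '
      · rw [if_pos c2]
        simp [not_le.mpr c2]
      · rw [if_neg c2]
        simp [not_lt.mp c1, not_lt.mp c2]
  · -- loop done: the middle check
    have hke := not_lt.mp hk
    rw [PySem.List.pyRange_one_eq_nil hke]
    rw [hE] at hke h1
    simp only [pvA_inner, hlen]
    rw [pvZseg]
    by_cases hev : ((w.length : Int) % 2 == 0 && decide ((w.length : Int) > 0)) = true
    · -- length even and positive; k = (n-1)/2 = n/2 - 1 and the segment is the middle pair
      have hev' : (w.length : Int) % 2 = 0 ∧ 0 < (w.length : Int) := by simpa using hev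
      have hk2 : k = (w.length : Int) / 2 - 1 := by omega
      have hfd : PySem.Int.floordiv ((w.length : Int)) 2 = (w.length : Int) / 2 := by
        simp [PySem.Int.floordiv, Int.fdiv_eq_ediv]
      rw [if_pos hev, hfd]
      rw [if_neg (by omega : ¬ (w.length : Int) - 1 - k ≤ k)]
      have hz : pvZseg w (k + 1) ((w.length : Int) - 1 - k - 1) = true := by
        rw [pvZseg, if_pos (by omega)]
      have e1 : (w.length : Int) - 1 - k = (w.length : Int) / 2 := by omega
      have e2 : k + 1 = (w.length : Int) / 2 := by omega
      rw [hz, e1, e2, hk2]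
      by_cases c : PySem.List.pyGetD w ((w.length : Int) / 2 - 1) ' ' >
          PySem.List.pyGetD w ((w.length : Int) / 2) ' '
      · rw [if_pos c]
        simp [not_le.mpr c]
      · rw [if_neg c]
        simp [not_lt.mp c]
    · -- length odd (or 0): no middle check, and the segment is empty
      rw [if_neg hev]
      have hodd : ¬ ((w.length : Int) % 2 = 0 ∧ 0 < (w.length : Int)) := by simpa using hev
      rw [if_pos (by omega : (w.length : Int) - 1 - k ≤ k)]
termination_by (PySem.Int.floordiv (PySem.Chars.len w - 1) 2 - k).toNat
decreasing_by simp [PySem.Int.floordiv, Int.fdiv_eq_ediv] at *; omega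

lemma pv_word (w : List Char) :
    pvA_inner w (PySem.List.pyRange 0 (PySem.Int.floordiv (PySem.Chars.len w - 1) 2) 1) = pvB_word_ok w := by
  rw [pvB_word_ok, pvB_seg]
  have := pvA_seg w 0 le_rfl (le_max_right _ _)
  simpa using this

lemma pv_words (ws : List (List Char)) : pvA_words ws = ws.all pvB_word_ok := by
  induction ws with
  | nil => rfl
  | cons w ws ih =>
      rw [pvA_words, pv_word, List.all_cons, ih]
      by_cases h : pvB_word_ok w <;> simp [h]

-- ===== VERDICT (by name: the statement is the Claim_ definition above) =====
theorem is_cyclone_phrase_spec : Claim_equal_is_cyclone_phrase := by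
  intro s _
  show is_cyclone_phrase s = is_cyclone_phrase_alt s
  rw [is_cyclone_phrase, is_cyclone_phrase_alt, pv_words]
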